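-- pv_equiv track=rewrite | github.com/haolunc/ARC-RL | reference_solutions/solutions/a5f85a15.py | transform
-- ===== SOURCE A (Python) =====
-- def transform(grid):
--
--     n = len(grid)
--     if n == 0:
--         return grid
--     m = len(grid[0])
--     out = [row[:] for row in grid]
--
--     for c in range(-n + 1, m):
--         positions = []
--         i_start = max(0, -c)
--         i_end = min(n - 1, m - 1 - c)
--         for i in range(i_start, i_end + 1):
--             j = i + c
--             if grid[i][j] != 0:
--                 positions.append((i, j))
--
--         for t, (i, j) in enumerate(positions):
--             if t % 2 == 1:
--                 out[i][j] = 4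
--     return out
-- ===== SOURCE B (Python) =====
-- def transform(grid):
--     n = len(grid)
--     if n == 0:
--         return grid
--     m = len(grid[0])
--     out = [row[:] for row in grid]
--     counts = {}
--     for i in range(n):
--         for j in range(m):
--             if grid[i][j] != 0:
--                 d = j - i
--                 counts[d] = counts.get(d, 0) + 1
--                 if counts[d] % 2 == 0:
--                     out[i][j] = 4
--     return out
-- ===== Notes on version B (the rewrite author's own statement) =====
-- stated objective: simpler
-- what changed: Replaces the per-diagonal sweep (outer loop over diagonal offsets, building a positions list per diagonal, then an enumerate pass marking odd indices) by a single row-major pass over the cells that keeps a dict of running nonzero counts per diagonal key j-i and marks a cell when its diagonal count becomes even.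
import Mathlib
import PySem

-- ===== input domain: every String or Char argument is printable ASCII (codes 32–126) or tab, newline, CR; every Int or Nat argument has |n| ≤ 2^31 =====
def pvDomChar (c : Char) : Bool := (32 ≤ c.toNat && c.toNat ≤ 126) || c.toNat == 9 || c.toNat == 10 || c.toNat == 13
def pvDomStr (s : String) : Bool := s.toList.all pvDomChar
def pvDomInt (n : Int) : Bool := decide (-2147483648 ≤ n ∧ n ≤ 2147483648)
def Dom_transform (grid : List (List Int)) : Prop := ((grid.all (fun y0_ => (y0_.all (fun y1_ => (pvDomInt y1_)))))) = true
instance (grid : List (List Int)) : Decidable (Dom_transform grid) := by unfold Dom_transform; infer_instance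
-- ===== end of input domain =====

-- B replaces A's per-diagonal sweep by one row-major pass keeping a dict of per-diagonal
-- nonzero counts (objective: simpler / alternative decomposition; same asymptotic cost).

-- out[i][j] read/write helpers shared by both ports (used only with nonneg in-range indices)
def pvGetCell (g : List (List Int)) (i j : Int) : Int :=
  (g.getD i.toNat []).getD j.toNat 0

def pvSetCell (g : List (List Int)) (i j : Int) (v : Int) : List (List Int) :=
  g.set i.toNat ((g.getD i.toNat []).set j.toNat v)

-- ===== PORT A =====
def transform (grid : List (List Int)) : List (List Int) :=
  let n : Int := grid.length
  if n = 0 then grid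
  else
    let m : Int := (grid.headD []).length
    let out := grid.map (fun row => row)   -- out = [row[:] for row in grid]
    (PySem.List.pyRange (-n + 1) m 1).foldl (fun out c =>
      let iStart : Int := max 0 (-c)
      let iEnd : Int := min (n - 1) (m - 1 - c)
      let positions := (PySem.List.pyRange iStart (iEnd + 1) 1).foldl
        (fun ps i => if pvGetCell grid i (i + c) ≠ 0 then ps ++ [(i, i + c)] else ps)
        ([] : List (Int × Int))
      (PySem.List.enumerate positions 0).foldl (fun out tij =>
        if PySem.Int.mod tij.1 2 = 1 then pvSetCell out tij.2.1 tij.2.2 4 else out) out)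
      out

-- ===== PORT B =====
def transform_alt (grid : List (List Int)) : List (List Int) :=
  let n : Int := grid.length
  if n = 0 then grid
  else
    let m : Int := (grid.headD []).length
    let st0 : List (List Int) × PySem.Dict Int Int := (grid.map (fun row => row), PySem.Dict.empty)
    let st := (PySem.List.pyRange 0 n 1).foldl (fun st i =>
      (PySem.List.pyRange 0 m 1).foldl (fun (st : List (List Int) × PySem.Dict Int Int) j =>
        if pvGetCell grid i j ≠ 0 then
          let d := j - i
          let cnt := st.2.getD d 0 + 1
          let counts := st.2.insert d cnt
          if PySem.Int.mod cnt 2 = 0 then (pvSetCell st.1 i j 4, counts) else (st.1, counts)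
        else st) st) st0
    st.1

-- ===== PRECONDITION & SPEC =====
-- Pre_ excludes exactly the ragged grids whose first row is longer than some later row:
-- there Python A raises IndexError on grid[i][j] (and B raises identically).
def Pre_transform (grid : List (List Int)) : Prop :=
  ∀ row ∈ grid, (grid.headD []).length ≤ row.length
instance (grid : List (List Int)) : Decidable (Pre_transform grid) := by
  unfold Pre_transform; infer_instance

def pvWitness_transform : List (List Int) := [[1, 0, 2], [0, 3, 0], [5, 0, 7]]

def Spec_transform (grid : List (List Int)) (out : List (List Int)) : Prop := out = transform_alt grid
instance (grid : List (List Int)) (out : List (List Int)) : Decidable (Spec_transform grid out) := by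
  unfold Spec_transform; infer_instance

-- ===== CLAIM (what is proved, stated in full; the proofs are below) =====
def Claim_equal_transform : Prop := ∀ (grid : List (List Int)), Dom_transform grid → Pre_transform grid → Spec_transform grid (transform grid)

-- ===== LEMMAS AND PROOFS =====

-- g has grid's shape: same length and the same row lengths
def pvShape (grid g : List (List Int)) : Prop :=
  g.length = grid.length ∧ ∀ k : Nat, (g.getD k []).length = (grid.getD k []).length

-- number of nonzero cells strictly above (a,b) on its diagonal
def pvCnt (grid : List (List Int)) (a b : Int) : Nat :=
  ((PySem.List.pyRange (max 0 (a - b)) a 1).filter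
    (fun i' => decide (pvGetCell grid i' (i' + (b - a)) ≠ 0))).length

-- the cells both programs set to 4
def pvMark (grid : List (List Int)) (n m : Int) (a b : Int) : Bool :=
  decide (0 ≤ a ∧ a < n ∧ 0 ≤ b ∧ b < m ∧ pvGetCell grid a b ≠ 0 ∧ pvCnt grid a b % 2 = 1)

-- B's dict content: nonzero cells on diagonal d processed before reaching (i,j) row-major
def pvPC (grid : List (List Int)) (n m : Int) (d i j : Int) : Nat :=
  ((PySem.List.pyRange 0 n 1).filter
    (fun i' => decide (0 ≤ i' + d ∧ i' + d < m ∧ (i' < i ∨ (i' = i ∧ i' + d < j)) ∧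
      pvGetCell grid i' (i' + d) ≠ 0))).length

lemma pv_getD_set {α : Type} (l : List α) (i k : Nat) (x d : α) :
    (l.set i x).getD k d = if i = k ∧ i < l.length then x else l.getD k d := by
  simp [List.getD, List.getElem?_set]
  split_ifs with h1 h2 <;> simp_all <;> omega

lemma pvShape_refl (grid : List (List Int)) : pvShape grid grid := ⟨rfl, fun _ => rfl⟩

lemma pvShape_set (grid g : List (List Int)) (i j : Int) (v : Int) (h : pvShape grid g) :
    pvShape grid (pvSetCell g i j v) := by
  obtain ⟨h1, h2⟩ := h
  refine ⟨by simp [pvSetCell, h1], fun k => ?_⟩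
  rw [pvSetCell, pv_getD_set]
  split_ifs with hif
  · rw [← hif.1, List.length_set]; exact h2 i.toNat
  · exact h2 k

lemma pvGetCell_set (g : List (List Int)) (i j a b : Int) (v : Int)
    (hi0 : 0 ≤ i) (hj0 : 0 ≤ j) (ha : 0 ≤ a) (hb : 0 ≤ b)
    (hi : i.toNat < g.length) (hj : j.toNat < (g.getD i.toNat []).length) :
    pvGetCell (pvSetCell g i j v) a b = if a = i ∧ b = j then v else pvGetCell g a b := by
  rw [pvGetCell, pvSetCell, pv_getD_set]
  by_cases hai : a = i
  · subst hai
    rw [if_pos ⟨rfl, hi⟩, pv_getD_set]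
    by_cases hbj : b = j
    · subst hbj
      rw [if_pos ⟨rfl, hj⟩, if_pos ⟨rfl, rfl⟩]
    · rw [if_neg (by rintro ⟨h1, -⟩; exact hbj (by omega)),
          if_neg (by rintro ⟨-, h1⟩; exact hbj h1)]
      rfl
  · rw [if_neg (by rintro ⟨h1, -⟩; exact hai (by omega)),
        if_neg (by rintro ⟨h1, -⟩; exact hai h1)]
    rfl

lemma pvGridsEq (grid g1 g2 : List (List Int)) (h1 : pvShape grid g1) (h2 : pvShape grid g2)
    (hc : ∀ a b : Int, 0 ≤ a → 0 ≤ b → pvGetCell g1 a b = pvGetCell g2 a b) : g1 = g2 := by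
  have hlen : g1.length = g2.length := h1.1.trans h2.1.symm
  apply List.ext_getElem hlen
  intro k hk1 hk2
  have hr1 : g1.getD k [] = g1[k] := List.getD_eq_getElem g1 [] hk1
  have hr2 : g2.getD k [] = g2[k] := List.getD_eq_getElem g2 [] hk2
  have hrl : g1[k].length = g2[k].length := by
    rw [← hr1, ← hr2, h1.2 k, h2.2 k]
  apply List.ext_getElem hrl
  intro j hj1 hj2
  have := hc k j (Int.natCast_nonneg _) (Int.natCast_nonneg _)
  simp only [pvGetCell, Int.toNat_natCast] at this
  rw [hr1, hr2] at this
  rw [← List.getD_eq_getElem g1[k] 0 hj1, ← List.getD_eq_getElem g2[k] 0 hj2]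
  exact this

lemma pvFilterRangeEq (p q : Int → Bool) (a b a' b' : Int)
    (h : ∀ x : Int, (a ≤ x ∧ x < b ∧ p x = true) ↔ (a' ≤ x ∧ x < b' ∧ q x = true)) :
    (PySem.List.pyRange a b 1).filter p = (PySem.List.pyRange a' b' 1).filter q := by
  have s1 : ((PySem.List.pyRange a b 1).filter p).Pairwise (· < ·) :=
    List.Pairwise.sublist List.filter_sublist (PySem.List.pairwise_lt_pyRange_one a b)
  have s2 : ((PySem.List.pyRange a' b' 1).filter q).Pairwise (· < ·) :=
    List.Pairwise.sublist List.filter_sublist (PySem.List.pairwise_lt_pyRange_one a' b')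
  refine List.Perm.eq_of_pairwise (fun x y _ _ u v => absurd v (by omega)) s1 s2
    ((List.perm_ext_iff_of_nodup (List.Pairwise.imp (fun h => by omega) s1)
      (List.Pairwise.imp (fun h => by omega) s2)).mpr ?_)
  intro x
  simp only [List.mem_filter, PySem.List.mem_pyRange_one]
  constructor
  · rintro ⟨⟨u1, u2⟩, u3⟩
    obtain ⟨v1, v2, v3⟩ := (h x).mp ⟨u1, u2, u3⟩
    exact ⟨⟨v1, v2⟩, v3⟩
  · rintro ⟨⟨u1, u2⟩, u3⟩
    obtain ⟨v1, v2, v3⟩ := (h x).mpr ⟨u1, u2, u3⟩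
    exact ⟨⟨v1, v2⟩, v3⟩

lemma pvIdxAppend (l1 l2 : List Int) (x : Int) (h : x ∉ l1) :
    (l1 ++ x :: l2).idxOf x = l1.length := by
  induction l1 with
  | nil => simp
  | cons y ys ih =>
    simp only [List.mem_cons, not_or] at h
    rw [List.cons_append, List.idxOf_cons_ne _ (Ne.symm h.1), ih h.2, List.length_cons]

lemma pvIdxFilterRange (q : Int → Bool) (s e x : Int) (hs : s ≤ x) (he : x < e) (hq : q x = true) :
    ((PySem.List.pyRange s e 1).filter q).idxOf x = ((PySem.List.pyRange s x 1).filter q).length := by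
  rw [PySem.List.pyRange_one_append s x e hs (by omega), List.filter_append,
      PySem.List.pyRange_one_cons he, List.filter_cons, if_pos hq]
  exact pvIdxAppend _ _ _ (by
    intro hmem
    have := List.mem_filter.mp hmem
    have := PySem.List.mem_pyRange_one.mp this.1
    omega)


lemma pvMarkFold (grid : List (List Int)) (c : Int) :
    ∀ (l : List Int), l.Pairwise (· < ·) →
    (∀ x ∈ l, 0 ≤ x ∧ 0 ≤ x + c ∧ x.toNat < grid.length ∧
      (x + c).toNat < (grid.getD x.toNat []).length) →
    ∀ (t0 : Int) (out : List (List Int)), pvShape grid out →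
    pvShape grid ((PySem.List.enumerate (l.map (fun i => (i, i + c))) t0).foldl
        (fun out tij => if PySem.Int.mod tij.1 2 = 1 then pvSetCell out tij.2.1 tij.2.2 4 else out) out) ∧
    ∀ a b : Int, 0 ≤ a → 0 ≤ b →
      pvGetCell ((PySem.List.enumerate (l.map (fun i => (i, i + c))) t0).foldl
        (fun out tij => if PySem.Int.mod tij.1 2 = 1 then pvSetCell out tij.2.1 tij.2.2 4 else out) out) a b
      = if a ∈ l ∧ b = a + c ∧ PySem.Int.mod (t0 + (l.idxOf a : Int)) 2 = 1 then 4
        else pvGetCell out a b := by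
  intro l
  induction l with
  | nil =>
    intro _ _ t0 out hsh
    simp only [List.map_nil, PySem.List.enumerate_nil, List.foldl_nil]
    exact ⟨hsh, fun a b _ _ => by simp⟩
  | cons x xs ih =>
    intro hpw hin t0 out hsh
    have hx := hin x List.mem_cons_self
    have hnotmem : x ∉ xs := fun hmem =>
      absurd ((List.pairwise_cons.mp hpw).1 x hmem) (by omega)
    rw [List.map_cons, PySem.List.enumerate_cons, List.foldl_cons]
    have hsh1 : pvShape grid (if PySem.Int.mod t0 2 = 1 then pvSetCell out x (x + c) 4 else out) := by
      split_ifs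
      · exact pvShape_set grid out _ _ _ hsh
      · exact hsh
    obtain ⟨ihs, ihc⟩ := ih (List.pairwise_cons.mp hpw).2
      (fun y hy => hin y (List.mem_cons_of_mem x hy)) (t0 + 1) _ hsh1
    refine ⟨ihs, fun a b ha hb => ?_⟩
    rw [ihc a b ha hb]
    have hout1 : pvGetCell (if PySem.Int.mod t0 2 = 1 then pvSetCell out x (x + c) 4 else out) a b
        = if a = x ∧ b = x + c ∧ PySem.Int.mod t0 2 = 1 then 4 else pvGetCell out a b := by
      split_ifs with h1 h2 h2
      · rw [pvGetCell_set out x (x + c) a b 4 hx.1 hx.2.1 ha hb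
          (by rw [hsh.1]; exact hx.2.2.1) (by rw [hsh.2]; exact hx.2.2.2), if_pos ⟨h2.1, h2.2.1⟩]
      · rw [pvGetCell_set out x (x + c) a b 4 hx.1 hx.2.1 ha hb
          (by rw [hsh.1]; exact hx.2.2.1) (by rw [hsh.2]; exact hx.2.2.2),
          if_neg (fun hcon => h2 ⟨hcon.1, hcon.2, h1⟩)]
      · exact absurd h2.2.2 h1
      · rfl
    by_cases hax : a = x
    · subst hax
      rw [hout1]
      simp [hnotmem, List.idxOf_cons_self]
    · have hidx : (x :: xs).idxOf a = xs.idxOf a + 1 := List.idxOf_cons_ne _ (fun h => hax h.symm)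
      rw [hout1, hidx]
      have harith : t0 + ((xs.idxOf a + 1 : Nat) : Int) = t0 + 1 + (xs.idxOf a : Int) := by
        push_cast; ring
      rw [harith]
      simp [hax]


lemma pvParityA (k : Nat) : PySem.Int.mod (0 + (k : Int)) 2 = 1 ↔ k % 2 = 1 := by
  rw [zero_add, PySem.Int.mod_eq_emod_of_pos (by norm_num)]; omega

lemma pvParityB (k : Nat) : PySem.Int.mod ((k : Int) + 1) 2 = 0 ↔ k % 2 = 1 := by
  rw [PySem.Int.mod_eq_emod_of_pos (by norm_num)]; omega

lemma pvDiag (grid : List (List Int)) (hpre : Pre_transform grid) (c : Int)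
    (out : List (List Int)) (hsh : pvShape grid out) :
    pvShape grid ((PySem.List.enumerate
        ((PySem.List.pyRange (max 0 (-c)) (min ((grid.length : Int) - 1) (((grid.headD []).length : Int) - 1 - c) + 1) 1).foldl
          (fun ps i => if pvGetCell grid i (i + c) ≠ 0 then ps ++ [(i, i + c)] else ps)
          ([] : List (Int × Int))) 0).foldl
        (fun out tij => if PySem.Int.mod tij.1 2 = 1 then pvSetCell out tij.2.1 tij.2.2 4 else out) out) ∧
    ∀ a b : Int, 0 ≤ a → 0 ≤ b →
      pvGetCell ((PySem.List.enumerate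
        ((PySem.List.pyRange (max 0 (-c)) (min ((grid.length : Int) - 1) (((grid.headD []).length : Int) - 1 - c) + 1) 1).foldl
          (fun ps i => if pvGetCell grid i (i + c) ≠ 0 then ps ++ [(i, i + c)] else ps)
          ([] : List (Int × Int))) 0).foldl
        (fun out tij => if PySem.Int.mod tij.1 2 = 1 then pvSetCell out tij.2.1 tij.2.2 4 else out) out) a b
        = if pvMark grid grid.length (grid.headD []).length a b = true ∧ b - a = c then 4
          else pvGetCell out a b := by
  rw [PySem.List.foldl_append_ite, List.nil_append]
  set q : Int → Bool := fun x => decide (pvGetCell grid x (x + c) ≠ 0) with hq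
  set l : List Int := (PySem.List.pyRange (max 0 (-c))
      (min ((grid.length : Int) - 1) (((grid.headD []).length : Int) - 1 - c) + 1) 1).filter q with hl
  have hpw : l.Pairwise (· < ·) :=
    List.Pairwise.sublist List.filter_sublist (PySem.List.pairwise_lt_pyRange_one _ _)
  have hmem : ∀ x : Int, x ∈ l ↔ (max 0 (-c) ≤ x ∧
      x < min ((grid.length : Int) - 1) (((grid.headD []).length : Int) - 1 - c) + 1) ∧
      pvGetCell grid x (x + c) ≠ 0 := by
    intro x
    rw [hl, List.mem_filter, PySem.List.mem_pyRange_one, hq]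
    simp
  have hin : ∀ x ∈ l, 0 ≤ x ∧ 0 ≤ x + c ∧ x.toNat < grid.length ∧
      (x + c).toNat < (grid.getD x.toNat []).length := by
    intro x hxl
    obtain ⟨⟨h1, h2⟩, h3⟩ := (hmem x).mp hxl
    have hxn : x.toNat < grid.length := by omega
    refine ⟨by omega, by omega, hxn, ?_⟩
    have hrow := hpre (grid[x.toNat]) (List.getElem_mem hxn)
    rw [List.getD_eq_getElem _ _ hxn]
    omega
  obtain ⟨hs, hc'⟩ := pvMarkFold grid c l hpw hin 0 out hsh
  refine ⟨hs, fun a b ha hb => ?_⟩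
  rw [hc' a b ha hb]
  refine if_congr ?_ rfl rfl
  simp only [pvMark, decide_eq_true_eq]
  constructor
  · rintro ⟨hmeml, hbc, hpar⟩
    subst hbc
    obtain ⟨⟨h1, h2⟩, h3⟩ := (hmem a).mp hmeml
    have hidx := pvIdxFilterRange q (max 0 (-c))
      (min ((grid.length : Int) - 1) (((grid.headD []).length : Int) - 1 - c) + 1) a h1 h2
      (by rw [hq]; simpa using h3)
    have hcnt : pvCnt grid a (a + c) = l.idxOf a := by
      have e1 : a - (a + c) = -c := by ring
      have e2 : a + c - a = c := by ring
      rw [hl, pvCnt, e1, e2, ← hq, hidx]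
    refine ⟨⟨by omega, by omega, by omega, by omega, h3, ?_⟩, by ring⟩
    rw [hcnt]
    exact ((pvParityA (l.idxOf a)).mp hpar)
  · rintro ⟨⟨h1, h2, h3, h4, h5, h6⟩, hc2⟩
    have hbc : b = a + c := by omega
    subst hbc
    have hmema : a ∈ l := (hmem a).mpr ⟨⟨by omega, by omega⟩, h5⟩
    have hidx := pvIdxFilterRange q (max 0 (-c))
      (min ((grid.length : Int) - 1) (((grid.headD []).length : Int) - 1 - c) + 1) a (by omega) (by omega)
      (by rw [hq]; simpa using h5)
    have hcnt : pvCnt grid a (a + c) = l.idxOf a := by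
      have e1 : a - (a + c) = -c := by ring
      have e2 : a + c - a = c := by ring
      rw [hl, pvCnt, e1, e2, ← hq, hidx]
    refine ⟨hmema, rfl, ?_⟩
    exact (pvParityA _).mpr (by rw [← hcnt]; exact h6)


lemma pvAOuter (grid : List (List Int)) (hpre : Pre_transform grid) :
    ∀ (k : Nat) (c0 : Int) (out : List (List Int)),
      (((grid.headD []).length : Int) - c0).toNat = k →
      c0 ≤ ((grid.headD []).length : Int) →
      pvShape grid out →
      (∀ a b : Int, 0 ≤ a → 0 ≤ b → pvGetCell out a b =
        if pvMark grid grid.length (grid.headD []).length a b = true ∧ b - a < c0 then 4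
        else pvGetCell grid a b) →
      pvShape grid ((PySem.List.pyRange c0 ((grid.headD []).length : Int) 1).foldl
        (fun out c => (PySem.List.enumerate
          ((PySem.List.pyRange (max 0 (-c)) (min ((grid.length : Int) - 1) (((grid.headD []).length : Int) - 1 - c) + 1) 1).foldl
            (fun ps i => if pvGetCell grid i (i + c) ≠ 0 then ps ++ [(i, i + c)] else ps)
            ([] : List (Int × Int))) 0).foldl
          (fun out tij => if PySem.Int.mod tij.1 2 = 1 then pvSetCell out tij.2.1 tij.2.2 4 else out) out) out) ∧
      (∀ a b : Int, 0 ≤ a → 0 ≤ b →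
        pvGetCell ((PySem.List.pyRange c0 ((grid.headD []).length : Int) 1).foldl
        (fun out c => (PySem.List.enumerate
          ((PySem.List.pyRange (max 0 (-c)) (min ((grid.length : Int) - 1) (((grid.headD []).length : Int) - 1 - c) + 1) 1).foldl
            (fun ps i => if pvGetCell grid i (i + c) ≠ 0 then ps ++ [(i, i + c)] else ps)
            ([] : List (Int × Int))) 0).foldl
          (fun out tij => if PySem.Int.mod tij.1 2 = 1 then pvSetCell out tij.2.1 tij.2.2 4 else out) out) out) a b =
        if pvMark grid grid.length (grid.headD []).length a b = true then 4 else pvGetCell grid a b) := by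
  intro k
  induction k with
  | zero =>
    intro c0 out hk hle hsh hout
    have hc0 : c0 = ((grid.headD []).length : Int) := by omega
    subst hc0
    rw [PySem.List.pyRange_one_eq_nil (le_refl _), List.foldl_nil]
    refine ⟨hsh, fun a b ha hb => ?_⟩
    rw [hout a b ha hb]
    refine if_congr ?_ rfl rfl
    constructor
    · exact fun h => h.1
    · intro h1
      refine ⟨h1, ?_⟩
      simp only [pvMark, decide_eq_true_eq] at h1
      omega
  | succ k ih =>
    intro c0 out hk hle hsh hout
    have hlt : c0 < ((grid.headD []).length : Int) := by omega
    rw [PySem.List.pyRange_one_cons hlt]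
    simp only [List.foldl_cons]
    obtain ⟨hs1, hc1⟩ := pvDiag grid hpre c0 out hsh
    refine ih (c0 + 1) _ (by omega) (by omega) hs1 (fun a b ha hb => ?_)
    rw [hc1 a b ha hb, hout a b ha hb]
    by_cases hm : pvMark grid grid.length (grid.headD []).length a b = true
    · simp only [hm, true_and]
      split_ifs <;> first | rfl | omega
    · rw [if_neg (fun hcon => hm hcon.1), if_neg (fun hcon => hm hcon.1),
          if_neg (fun hcon => hm hcon.1)]

lemma pvA_char (grid : List (List Int)) (hne : grid ≠ []) (hpre : Pre_transform grid) :
    pvShape grid (transform grid) ∧ ∀ a b : Int, 0 ≤ a → 0 ≤ b →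
      pvGetCell (transform grid) a b =
        if pvMark grid grid.length (grid.headD []).length a b = true then 4
        else pvGetCell grid a b := by
  have hn : ¬((grid.length : Int) = 0) := by
    intro h
    exact hne (List.length_eq_zero_iff.mp (by exact_mod_cast h))
  have hn1 : 1 ≤ grid.length := List.length_pos_iff.mpr hne
  simp only [transform, if_neg hn, List.map_id']
  exact pvAOuter grid hpre ((((grid.headD []).length : Int) - (-(grid.length : Int) + 1)).toNat)
    (-(grid.length : Int) + 1) grid rfl (by omega) (pvShape_refl grid)
    (fun a b ha hb => by
      rw [if_neg]
      rintro ⟨hm, hlt⟩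
      simp only [pvMark, decide_eq_true_eq] at hm
      omega)


lemma pvPC_zero (grid : List (List Int)) (n m d : Int) : pvPC grid n m d 0 0 = 0 := by
  rw [pvPC]
  simp only [List.length_eq_zero_iff, List.filter_eq_nil_iff]
  intro x hx
  have hxr := PySem.List.mem_pyRange_one.mp hx
  simp only [decide_eq_true_eq]
  rintro ⟨h1, h2, h3, -⟩
  omega

lemma pvPC_succ (grid : List (List Int)) (n m d i j : Int)
    (hi : 0 ≤ i) (hin : i < n) (hj : 0 ≤ j) (hjm : j < m) :
    pvPC grid n m d i (j + 1)
      = pvPC grid n m d i j + (if d = j - i ∧ pvGetCell grid i j ≠ 0 then 1 else 0) := by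
  rw [pvPC, pvPC,
      PySem.List.pyRange_one_append 0 i n hi (by omega),
      PySem.List.pyRange_one_cons hin,
      List.filter_append, List.filter_append, List.filter_cons, List.filter_cons,
      List.length_append, List.length_append]
  have h1 : List.filter (fun i' => decide (0 ≤ i' + d ∧ i' + d < m ∧ (i' < i ∨ (i' = i ∧ i' + d < j + 1)) ∧ pvGetCell grid i' (i' + d) ≠ 0)) (PySem.List.pyRange 0 i 1)
      = List.filter (fun i' => decide (0 ≤ i' + d ∧ i' + d < m ∧ (i' < i ∨ (i' = i ∧ i' + d < j)) ∧ pvGetCell grid i' (i' + d) ≠ 0)) (PySem.List.pyRange 0 i 1) := by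
    refine List.filter_congr (fun x hx => ?_)
    have hxr := PySem.List.mem_pyRange_one.mp hx
    rw [decide_eq_decide]
    constructor
    · rintro ⟨u1, u2, -, u4⟩; exact ⟨u1, u2, Or.inl (by omega), u4⟩
    · rintro ⟨u1, u2, -, u4⟩; exact ⟨u1, u2, Or.inl (by omega), u4⟩
  have h2 : List.filter (fun i' => decide (0 ≤ i' + d ∧ i' + d < m ∧ (i' < i ∨ (i' = i ∧ i' + d < j + 1)) ∧ pvGetCell grid i' (i' + d) ≠ 0)) (PySem.List.pyRange (i + 1) n 1) = [] := by
    rw [List.filter_eq_nil_iff]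
    intro x hx
    have hxr := PySem.List.mem_pyRange_one.mp hx
    simp only [decide_eq_true_eq]
    rintro ⟨-, -, u3, -⟩
    omega
  have h3 : List.filter (fun i' => decide (0 ≤ i' + d ∧ i' + d < m ∧ (i' < i ∨ (i' = i ∧ i' + d < j)) ∧ pvGetCell grid i' (i' + d) ≠ 0)) (PySem.List.pyRange (i + 1) n 1) = [] := by
    rw [List.filter_eq_nil_iff]
    intro x hx
    have hxr := PySem.List.mem_pyRange_one.mp hx
    simp only [decide_eq_true_eq]
    rintro ⟨-, -, u3, -⟩
    omega
  rw [h1, h2, h3]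
  by_cases hd : d = j - i
  · subst hd
    have ej : i + (j - i) = j := by ring
    rw [ej]
    by_cases hnz : pvGetCell grid i j ≠ 0
    · have hp1 : decide (0 ≤ j ∧ j < m ∧ (i < i ∨ (i = i ∧ j < j + 1)) ∧ pvGetCell grid i j ≠ 0) = true :=
        decide_eq_true ⟨hj, hjm, Or.inr ⟨rfl, by omega⟩, hnz⟩
      have hp0 : decide (0 ≤ j ∧ j < m ∧ (i < i ∨ (i = i ∧ j < j)) ∧ pvGetCell grid i j ≠ 0) = false :=
        decide_eq_false (by rintro ⟨-, -, u3, -⟩; omega)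
      rw [hp1, hp0]
      simp [hnz]
    · have hp1 : decide (0 ≤ j ∧ j < m ∧ (i < i ∨ (i = i ∧ j < j + 1)) ∧ pvGetCell grid i j ≠ 0) = false :=
        decide_eq_false (by rintro ⟨-, -, -, u4⟩; exact hnz u4)
      have hp0 : decide (0 ≤ j ∧ j < m ∧ (i < i ∨ (i = i ∧ j < j)) ∧ pvGetCell grid i j ≠ 0) = false :=
        decide_eq_false (by rintro ⟨-, -, u3, -⟩; omega)
      rw [hp1, hp0]
      simp [hnz]
  · have hne : i + d ≠ j := by omega
    have hp : decide (0 ≤ i + d ∧ i + d < m ∧ (i < i ∨ (i = i ∧ i + d < j + 1)) ∧ pvGetCell grid i (i + d) ≠ 0)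
        = decide (0 ≤ i + d ∧ i + d < m ∧ (i < i ∨ (i = i ∧ i + d < j)) ∧ pvGetCell grid i (i + d) ≠ 0) := by
      rw [decide_eq_decide]
      constructor
      · rintro ⟨u1, u2, u3, u4⟩; exact ⟨u1, u2, by omega, u4⟩
      · rintro ⟨u1, u2, u3, u4⟩; exact ⟨u1, u2, by omega, u4⟩
    rw [hp, if_neg (show ¬(d = j - i ∧ pvGetCell grid i j ≠ 0) from fun hcon => hd hcon.1)]
    simp

lemma pvPC_rowend (grid : List (List Int)) (n m d i : Int) (hi : 0 ≤ i) :
    pvPC grid n m d i m = pvPC grid n m d (i + 1) 0 := by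
  rw [pvPC, pvPC]
  congr 1
  refine List.filter_congr (fun x hx => ?_)
  have hxr := PySem.List.mem_pyRange_one.mp hx
  rw [decide_eq_decide]
  constructor
  · rintro ⟨u1, u2, u3, u4⟩; exact ⟨u1, u2, by omega, u4⟩
  · rintro ⟨u1, u2, u3, u4⟩; exact ⟨u1, u2, by omega, u4⟩

lemma pvPC_eq_cnt (grid : List (List Int)) (n m i j : Int)
    (hi : 0 ≤ i) (hin : i < n) (hj : 0 ≤ j) (hjm : j < m) :
    pvPC grid n m (j - i) i j = pvCnt grid i j := by
  rw [pvPC, pvCnt]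
  rw [pvFilterRangeEq
    (fun i' => decide (0 ≤ i' + (j - i) ∧ i' + (j - i) < m ∧ (i' < i ∨ (i' = i ∧ i' + (j - i) < j)) ∧ pvGetCell grid i' (i' + (j - i)) ≠ 0))
    (fun i' => decide (pvGetCell grid i' (i' + (j - i)) ≠ 0))
    0 n (max 0 (i - j)) i ?_]
  intro x
  simp only [decide_eq_true_eq]
  constructor
  · rintro ⟨w0, w1, u1, u2, u3, u4⟩
    exact ⟨by omega, by omega, u4⟩
  · rintro ⟨w1, w2, u⟩
    exact ⟨by omega, by omega, by omega, by omega, Or.inl (by omega), u⟩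


lemma pvRowBound (grid : List (List Int)) (hpre : Pre_transform grid) (i j : Int)
    (hi : 0 ≤ i) (hin : i < (grid.length : Int)) (hj : 0 ≤ j)
    (hjm : j < ((grid.headD []).length : Int)) :
    j.toNat < (grid.getD i.toNat []).length := by
  have hxn : i.toNat < grid.length := by omega
  have hrow := hpre (grid[i.toNat]) (List.getElem_mem hxn)
  rw [List.getD_eq_getElem _ _ hxn]
  omega

lemma pvBInner (grid : List (List Int)) (hpre : Pre_transform grid) (i : Int)
    (hi : 0 ≤ i) (hin : i < (grid.length : Int)) :
    ∀ (k : Nat) (j0 : Int) (st : List (List Int) × PySem.Dict Int Int),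
      (((grid.headD []).length : Int) - j0).toNat = k → 0 ≤ j0 →
      j0 ≤ ((grid.headD []).length : Int) →
      pvShape grid st.1 →
      (∀ d : Int, st.2.getD d 0 = (pvPC grid grid.length (grid.headD []).length d i j0 : Int)) →
      (∀ a b : Int, 0 ≤ a → 0 ≤ b → pvGetCell st.1 a b =
        if pvMark grid grid.length (grid.headD []).length a b = true ∧ (a < i ∨ (a = i ∧ b < j0)) then 4
        else pvGetCell grid a b) →
      pvShape grid ((PySem.List.pyRange j0 ((grid.headD []).length : Int) 1).foldl
        (fun st j => if pvGetCell grid i j ≠ 0 then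
          if PySem.Int.mod (st.2.getD (j - i) 0 + 1) 2 = 0 then
            (pvSetCell st.1 i j 4, st.2.insert (j - i) (st.2.getD (j - i) 0 + 1))
          else (st.1, st.2.insert (j - i) (st.2.getD (j - i) 0 + 1))
        else st) st).1 ∧
      (∀ d : Int, ((PySem.List.pyRange j0 ((grid.headD []).length : Int) 1).foldl
        (fun st j => if pvGetCell grid i j ≠ 0 then
          if PySem.Int.mod (st.2.getD (j - i) 0 + 1) 2 = 0 then
            (pvSetCell st.1 i j 4, st.2.insert (j - i) (st.2.getD (j - i) 0 + 1))
          else (st.1, st.2.insert (j - i) (st.2.getD (j - i) 0 + 1))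
        else st) st).2.getD d 0
        = (pvPC grid grid.length (grid.headD []).length d i ((grid.headD []).length : Int) : Int)) ∧
      (∀ a b : Int, 0 ≤ a → 0 ≤ b →
        pvGetCell ((PySem.List.pyRange j0 ((grid.headD []).length : Int) 1).foldl
        (fun st j => if pvGetCell grid i j ≠ 0 then
          if PySem.Int.mod (st.2.getD (j - i) 0 + 1) 2 = 0 then
            (pvSetCell st.1 i j 4, st.2.insert (j - i) (st.2.getD (j - i) 0 + 1))
          else (st.1, st.2.insert (j - i) (st.2.getD (j - i) 0 + 1))
        else st) st).1 a b =
        if pvMark grid grid.length (grid.headD []).length a b = true ∧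
            (a < i ∨ (a = i ∧ b < ((grid.headD []).length : Int))) then 4
        else pvGetCell grid a b) := by
  intro k
  induction k with
  | zero =>
    intro j0 st hk hj0 hle hsh hcin hout
    have hj0m : j0 = ((grid.headD []).length : Int) := by omega
    subst hj0m
    rw [PySem.List.pyRange_one_eq_nil (le_refl _), List.foldl_nil]
    exact ⟨hsh, hcin, hout⟩
  | succ k ih =>
    intro j0 st hk hj0 hle hsh hcin hout
    have hlt : j0 < ((grid.headD []).length : Int) := by omega
    rw [PySem.List.pyRange_one_cons hlt]
    simp only [List.foldl_cons]
    by_cases hnz : pvGetCell grid i j0 ≠ 0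
    · rw [if_pos hnz]
      have hpc := hcin (j0 - i)
      have hcnt := pvPC_eq_cnt grid grid.length (grid.headD []).length i j0 hi hin hj0 hlt
      have hcs : ∀ d : Int,
          ((st.2.insert (j0 - i) (st.2.getD (j0 - i) 0 + 1)).getD d 0)
            = (pvPC grid grid.length (grid.headD []).length d i (j0 + 1) : Int) := by
        intro d
        rw [PySem.Dict.getD_insert]
        by_cases hd : d = j0 - i
        · subst hd
          rw [if_pos rfl, hpc,
              pvPC_succ grid grid.length (grid.headD []).length (j0 - i) i j0 hi hin hj0 hlt,
              if_pos ⟨rfl, hnz⟩]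
          push_cast; ring
        · rw [if_neg hd, hcin d,
              pvPC_succ grid grid.length (grid.headD []).length d i j0 hi hin hj0 hlt,
              if_neg (fun hcon => hd hcon.1)]
          simp
      by_cases hpar : PySem.Int.mod (st.2.getD (j0 - i) 0 + 1) 2 = 0
      · rw [if_pos hpar]
        have hmark : pvMark grid grid.length (grid.headD []).length i j0 = true := by
          apply decide_eq_true
          refine ⟨hi, hin, hj0, hlt, hnz, ?_⟩
          have hp2 := hpar
          rw [hpc, hcnt] at hp2
          exact (pvParityB _).mp hp2
        refine ih (j0 + 1) (pvSetCell st.1 i j0 4, st.2.insert (j0 - i) (st.2.getD (j0 - i) 0 + 1))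
          (by omega) (by omega) (by omega) (pvShape_set grid st.1 i j0 4 hsh) hcs ?_
        intro a b ha hb
        show pvGetCell (pvSetCell st.1 i j0 4) a b = _
        rw [pvGetCell_set st.1 i j0 a b 4 hi hj0 ha hb
          (by rw [hsh.1]; omega)
          (by rw [hsh.2]; exact pvRowBound grid hpre i j0 hi hin hj0 hlt)]
        by_cases hab : a = i ∧ b = j0
        · obtain ⟨ha1, hb1⟩ := hab
          subst ha1; subst hb1
          rw [if_pos ⟨rfl, rfl⟩, if_pos ⟨hmark, Or.inr ⟨rfl, by omega⟩⟩]
        · rw [if_neg hab, hout a b ha hb]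
          refine if_congr (Iff.intro ?_ ?_) rfl rfl
          · rintro ⟨hm1, hm2⟩; exact ⟨hm1, by omega⟩
          · rintro ⟨hm1, hm2⟩; exact ⟨hm1, by omega⟩
      · rw [if_neg hpar]
        have hnomark : pvMark grid grid.length (grid.headD []).length i j0 = false := by
          apply decide_eq_false
          rintro ⟨-, -, -, -, -, h6⟩
          apply hpar
          rw [hpc, hcnt]
          exact (pvParityB _).mpr h6
        refine ih (j0 + 1) (st.1, st.2.insert (j0 - i) (st.2.getD (j0 - i) 0 + 1))
          (by omega) (by omega) (by omega) hsh hcs ?_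
        intro a b ha hb
        show pvGetCell st.1 a b = _
        rw [hout a b ha hb]
        refine if_congr (Iff.intro ?_ ?_) rfl rfl
        · rintro ⟨hm1, hm2⟩; exact ⟨hm1, by omega⟩
        · rintro ⟨hm1, hm2⟩
          refine ⟨hm1, ?_⟩
          by_cases hab : a = i ∧ b = j0
          · obtain ⟨ha1, hb1⟩ := hab
            subst ha1; subst hb1
            rw [hnomark] at hm1
            cases hm1
          · omega
    · rw [if_neg hnz]
      have hnomark : pvMark grid grid.length (grid.headD []).length i j0 = false :=
        decide_eq_false (by rintro ⟨-, -, -, -, h5, -⟩; exact hnz h5)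
      refine ih (j0 + 1) st (by omega) (by omega) (by omega) hsh ?_ ?_
      · intro d
        rw [hcin d, pvPC_succ grid grid.length (grid.headD []).length d i j0 hi hin hj0 hlt,
            if_neg (fun hcon => hnz hcon.2)]
        simp
      · intro a b ha hb
        rw [hout a b ha hb]
        refine if_congr (Iff.intro ?_ ?_) rfl rfl
        · rintro ⟨hm1, hm2⟩; exact ⟨hm1, by omega⟩
        · rintro ⟨hm1, hm2⟩
          refine ⟨hm1, ?_⟩
          by_cases hab : a = i ∧ b = j0
          · obtain ⟨ha1, hb1⟩ := hab
            subst ha1; subst hb1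
            rw [hnomark] at hm1
            cases hm1
          · omega

lemma pvBOuter (grid : List (List Int)) (hpre : Pre_transform grid) :
    ∀ (k : Nat) (i0 : Int) (st : List (List Int) × PySem.Dict Int Int),
      ((grid.length : Int) - i0).toNat = k → 0 ≤ i0 → i0 ≤ (grid.length : Int) →
      pvShape grid st.1 →
      (∀ d : Int, st.2.getD d 0 = (pvPC grid grid.length (grid.headD []).length d i0 0 : Int)) →
      (∀ a b : Int, 0 ≤ a → 0 ≤ b → pvGetCell st.1 a b =
        if pvMark grid grid.length (grid.headD []).length a b = true ∧ a < i0 then 4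
        else pvGetCell grid a b) →
      pvShape grid ((PySem.List.pyRange i0 (grid.length : Int) 1).foldl
        (fun st i => (PySem.List.pyRange 0 ((grid.headD []).length : Int) 1).foldl
          (fun st j => if pvGetCell grid i j ≠ 0 then
            if PySem.Int.mod (st.2.getD (j - i) 0 + 1) 2 = 0 then
              (pvSetCell st.1 i j 4, st.2.insert (j - i) (st.2.getD (j - i) 0 + 1))
            else (st.1, st.2.insert (j - i) (st.2.getD (j - i) 0 + 1))
          else st) st) st).1 ∧
      (∀ a b : Int, 0 ≤ a → 0 ≤ b →
        pvGetCell ((PySem.List.pyRange i0 (grid.length : Int) 1).foldl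
        (fun st i => (PySem.List.pyRange 0 ((grid.headD []).length : Int) 1).foldl
          (fun st j => if pvGetCell grid i j ≠ 0 then
            if PySem.Int.mod (st.2.getD (j - i) 0 + 1) 2 = 0 then
              (pvSetCell st.1 i j 4, st.2.insert (j - i) (st.2.getD (j - i) 0 + 1))
            else (st.1, st.2.insert (j - i) (st.2.getD (j - i) 0 + 1))
          else st) st) st).1 a b =
        if pvMark grid grid.length (grid.headD []).length a b = true then 4
        else pvGetCell grid a b) := by
  intro k
  induction k with
  | zero =>
    intro i0 st hk h0 hle hsh hcin hout
    have hi0 : i0 = (grid.length : Int) := by omega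
    subst hi0
    rw [PySem.List.pyRange_one_eq_nil (le_refl _), List.foldl_nil]
    refine ⟨hsh, fun a b ha hb => ?_⟩
    rw [hout a b ha hb]
    refine if_congr (Iff.intro ?_ ?_) rfl rfl
    · exact fun h => h.1
    · intro h1
      refine ⟨h1, ?_⟩
      simp only [pvMark, decide_eq_true_eq] at h1
      omega
  | succ k ih =>
    intro i0 st hk h0 hle hsh hcin hout
    have hlt : i0 < (grid.length : Int) := by omega
    rw [PySem.List.pyRange_one_cons hlt]
    simp only [List.foldl_cons]
    obtain ⟨bs, bc, bo⟩ := pvBInner grid hpre i0 h0 hlt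
      (((grid.headD []).length : Int) - 0).toNat 0 st rfl (le_refl 0)
      (by positivity) hsh
      (by intro d; rw [hcin d])
      (by
        intro a b ha hb
        rw [hout a b ha hb]
        refine if_congr (Iff.intro ?_ ?_) rfl rfl
        · rintro ⟨hm1, hm2⟩; exact ⟨hm1, by omega⟩
        · rintro ⟨hm1, hm2⟩; exact ⟨hm1, by omega⟩)
    refine ih (i0 + 1) _ (by omega) (by omega) (by omega) bs ?_ ?_
    · intro d
      rw [bc d, pvPC_rowend grid grid.length (grid.headD []).length d i0 h0]
    · intro a b ha hb
      rw [bo a b ha hb]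
      refine if_congr (Iff.intro ?_ ?_) rfl rfl
      · rintro ⟨hm1, hm2⟩
        refine ⟨hm1, ?_⟩
        simp only [pvMark, decide_eq_true_eq] at hm1
        omega
      · rintro ⟨hm1, hm2⟩
        refine ⟨hm1, ?_⟩
        simp only [pvMark, decide_eq_true_eq] at hm1
        omega

lemma pvB_char (grid : List (List Int)) (hne : grid ≠ []) (hpre : Pre_transform grid) :
    pvShape grid (transform_alt grid) ∧ ∀ a b : Int, 0 ≤ a → 0 ≤ b →
      pvGetCell (transform_alt grid) a b =
        if pvMark grid grid.length (grid.headD []).length a b = true then 4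
        else pvGetCell grid a b := by
  have hn : ¬((grid.length : Int) = 0) := by
    intro h
    exact hne (List.length_eq_zero_iff.mp (by exact_mod_cast h))
  simp only [transform_alt, if_neg hn, List.map_id']
  refine pvBOuter grid hpre ((grid.length : Int) - 0).toNat 0 (grid, PySem.Dict.empty)
    rfl (le_refl 0) (by positivity) (pvShape_refl grid) ?_ ?_
  · intro d
    rw [pvPC_zero]
    simp [PySem.Dict.getD_empty]
  · intro a b ha hb
    rw [if_neg (by rintro ⟨-, h⟩; omega)]

theorem transform_spec : Claim_equal_transform := by
  intro grid _hdom hpre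
  unfold Spec_transform
  by_cases hne : grid = []
  · subst hne
    rfl
  · obtain ⟨hsA, hcA⟩ := pvA_char grid hne hpre
    obtain ⟨hsB, hcB⟩ := pvB_char grid hne hpre
    exact pvGridsEq grid _ _ hsA hsB (fun a b ha hb => by
      rw [hcA a b ha hb, hcB a b ha hb])
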